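-- pv_equiv track=rewrite | github.com/qikaiquant/stock_china_mainland | warm/warmup.py | join_res
-- ===== SOURCE A (Python) =====
-- def join_res(price_res, val_res):
--     join_dict = {}
--     for (dt, close, high_limit, paused) in price_res:
--         join_dict[dt] = [close, high_limit, paused, None, None, None]
--     for (dt, circulating_market_cap, st, market_cap) in val_res:
--         if dt not in join_dict:
--             join_dict[dt] = [None, None, None, circulating_market_cap, st, market_cap]
--         else:
--             join_dict[dt][3] = circulating_market_cap
--             join_dict[dt][4] = st
--             join_dict[dt][5] = market_cap
--     return join_dict
-- ===== SOURCE B (Python) =====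
-- def join_res(price_res, val_res):
--     price_map = {dt: [close, high_limit, paused]
--                  for (dt, close, high_limit, paused) in price_res}
--     val_map = {dt: [circulating_market_cap, st, market_cap]
--                for (dt, circulating_market_cap, st, market_cap) in val_res}
--     keys = list(price_map) + [dt for dt in val_map if dt not in price_map]
--     none3 = [None, None, None]
--     return {dt: price_map.get(dt, none3) + val_map.get(dt, none3) for dt in keys}
-- ===== Notes on version B (the rewrite author's own statement) =====
-- stated objective: simpler
-- what changed: A builds one dict it conditionally mutates field-by-field while streaming val_res; B builds two independent per-source index dicts in separate passes and then assembles each 6-element row by a pure merge over the ordered union of the key lists.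
import Mathlib
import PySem

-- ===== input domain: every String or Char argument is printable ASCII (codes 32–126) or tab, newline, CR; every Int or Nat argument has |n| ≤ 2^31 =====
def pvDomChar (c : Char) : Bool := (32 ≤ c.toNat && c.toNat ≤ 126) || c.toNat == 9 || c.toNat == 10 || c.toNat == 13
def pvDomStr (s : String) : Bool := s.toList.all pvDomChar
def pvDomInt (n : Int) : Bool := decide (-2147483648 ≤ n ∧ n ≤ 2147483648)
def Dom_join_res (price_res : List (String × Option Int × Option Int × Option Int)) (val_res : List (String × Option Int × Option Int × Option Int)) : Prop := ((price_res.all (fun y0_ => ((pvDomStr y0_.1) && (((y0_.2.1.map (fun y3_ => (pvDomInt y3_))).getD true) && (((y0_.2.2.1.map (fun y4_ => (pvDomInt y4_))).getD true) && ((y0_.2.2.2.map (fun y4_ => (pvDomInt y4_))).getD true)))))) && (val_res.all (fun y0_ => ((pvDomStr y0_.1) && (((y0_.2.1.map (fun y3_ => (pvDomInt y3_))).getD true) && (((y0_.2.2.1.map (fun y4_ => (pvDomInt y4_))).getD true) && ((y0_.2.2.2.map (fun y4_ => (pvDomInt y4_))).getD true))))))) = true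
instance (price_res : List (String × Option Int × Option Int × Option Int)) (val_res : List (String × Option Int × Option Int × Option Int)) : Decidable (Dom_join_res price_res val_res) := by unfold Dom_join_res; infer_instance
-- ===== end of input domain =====

-- B replaces A's single incrementally mutated dict with two independent per-source index dicts
-- merged over the ordered union of their key lists (objective: simpler decomposition; same cost).

-- ===== PORT A =====
-- one pass over price_res inserting 6-slot rows, then one pass over val_res that either
-- inserts a fresh row or overwrites slots 3..5 of the existing row (list mutation = List.set)
def join_res (price_res : List (String × Option Int × Option Int × Option Int)) (val_res : List (String × Option Int × Option Int × Option Int)) : List (String × List (Option Int)) :=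
  let d0 : PySem.Dict String (List (Option Int)) :=
    price_res.foldl (fun d x =>
      d.insert x.1 [x.2.1, x.2.2.1, x.2.2.2, none, none, none]) PySem.Dict.empty
  let d1 :=
    val_res.foldl (fun d x =>
      d.insert x.1 (match d.get? x.1 with
        | none => [none, none, none, x.2.1, x.2.2.1, x.2.2.2]
        | some v => ((v.set 3 x.2.1).set 4 x.2.2.1).set 5 x.2.2.2)) d0
  d1.items

-- ===== PORT B =====
def join_res_alt (price_res : List (String × Option Int × Option Int × Option Int)) (val_res : List (String × Option Int × Option Int × Option Int)) : List (String × List (Option Int)) :=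
  let pm : PySem.Dict String (List (Option Int)) :=
    price_res.foldl (fun d x => d.insert x.1 [x.2.1, x.2.2.1, x.2.2.2]) PySem.Dict.empty
  let vm : PySem.Dict String (List (Option Int)) :=
    val_res.foldl (fun d x => d.insert x.1 [x.2.1, x.2.2.1, x.2.2.2]) PySem.Dict.empty
  let keys := pm.keys ++ vm.keys.filter (fun k => !(pm.contains k))
  let none3 : List (Option Int) := [none, none, none]
  keys.map (fun k => (k, pm.getD k none3 ++ vm.getD k none3))

-- ===== PRECONDITION & SPEC =====
def Spec_join_res (price_res : List (String × Option Int × Option Int × Option Int)) (val_res : List (String × Option Int × Option Int × Option Int)) (out : List (String × List (Option Int))) : Prop := out = join_res_alt price_res val_res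
instance (price_res : List (String × Option Int × Option Int × Option Int)) (val_res : List (String × Option Int × Option Int × Option Int)) (out : List (String × List (Option Int))) : Decidable (Spec_join_res price_res val_res out) := by unfold Spec_join_res; infer_instance

-- ===== CLAIM (what is proved, stated in full; the proofs are below) =====
def Claim_equal_join_res : Prop := ∀ (price_res : List (String × Option Int × Option Int × Option Int)) (val_res : List (String × Option Int × Option Int × Option Int)), Dom_join_res price_res val_res → Spec_join_res price_res val_res (join_res price_res val_res)

-- ===== LEMMAS AND PROOFS =====

-- merge of an optional price triple and an optional valuation triple into the 6-slot row
def pvMrg (po qo : Option (List (Option Int))) : Option (List (Option Int)) :=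
  match po, qo with
  | none, none => none
  | po, qo => some (po.getD [none, none, none] ++ qo.getD [none, none, none])

-- every value in a dict built by the 3-slot insert loop has length 3
theorem pv_len3 (l : List (String × Option Int × Option Int × Option Int))
    (d : PySem.Dict String (List (Option Int)))
    (hd : ∀ k p, d.get? k = some p → p.length = 3) :
    ∀ k p, (l.foldl (fun d x => d.insert x.1 [x.2.1, x.2.2.1, x.2.2.2]) d).get? k = some p → p.length = 3 := by
  induction l generalizing d with
  | nil => exact hd
  | cons x l ih =>
    intro k p h
    refine ih _ ?_ k p h
    intro k' p' h'
    rw [PySem.Dict.get?_insert] at h'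
    split at h'
    · cases h'; rfl
    · exact hd _ _ h'

-- A's price pass is B's price pass with three none-slots appended to every value
theorem pv_price (l : List (String × Option Int × Option Int × Option Int))
    (a b : PySem.Dict String (List (Option Int)))
    (hab : ∀ k, a.get? k = (b.get? k).map (fun p => p ++ [none, none, none])) :
    ∀ k, (l.foldl (fun d x => d.insert x.1 [x.2.1, x.2.2.1, x.2.2.2, none, none, none]) a).get? k
      = ((l.foldl (fun d x => d.insert x.1 [x.2.1, x.2.2.1, x.2.2.2]) b).get? k).map (fun p => p ++ [none, none, none]) := by
  induction l generalizing a b with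
  | nil => exact hab
  | cons y l ihl =>
    intro k
    simp only [List.foldl_cons]
    refine ihl _ _ ?_ k
    intro k'
    rw [PySem.Dict.get?_insert, PySem.Dict.get?_insert]
    by_cases hk : k' = y.1
    · simp [hk]
    · simp only [if_neg hk]; exact hab k'

-- invariant of A's valuation pass: lookups are the merge of pm-lookup and partial vm-lookup
theorem pv_inv (pm : PySem.Dict String (List (Option Int)))
    (hpm : ∀ k p, pm.get? k = some p → p.length = 3)
    (l : List (String × Option Int × Option Int × Option Int))
    (d vm : PySem.Dict String (List (Option Int)))
    (hvm : ∀ k p, vm.get? k = some p → p.length = 3)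
    (hd : ∀ k, d.get? k = pvMrg (pm.get? k) (vm.get? k)) :
    ∀ (k : String),
      (l.foldl (fun d x =>
        d.insert x.1 (match d.get? x.1 with
          | none => [none, none, none, x.2.1, x.2.2.1, x.2.2.2]
          | some v => ((v.set 3 x.2.1).set 4 x.2.2.1).set 5 x.2.2.2)) d).get? k
      = pvMrg (pm.get? k) ((l.foldl (fun d x => d.insert x.1 [x.2.1, x.2.2.1, x.2.2.2]) vm).get? k) := by
  induction l generalizing d vm with
  | nil => exact hd
  | cons x l ih =>
    intro k
    simp only [List.foldl_cons]
    refine ih _ _ ?_ ?_ k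
    · intro k' p' h'
      rw [PySem.Dict.get?_insert] at h'
      split at h'
      · cases h'; rfl
      · exact hvm _ _ h'
    · intro k'
      rw [PySem.Dict.get?_insert, PySem.Dict.get?_insert]
      by_cases hk : k' = x.1
      · simp only [if_pos hk]
        rw [hk, hd x.1]
        rcases hp : pm.get? x.1 with _ | p <;> rcases hv : vm.get? x.1 with _ | q
        · simp [pvMrg]
        · have h3 := hvm _ _ hv
          match q, h3 with
          | [q0, q1, q2], _ => simp [pvMrg]
        · have h3 := hpm _ _ hp
          match p, h3 with
          | [p0, p1, p2], _ => simp [pvMrg]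
        · have h3 := hpm _ _ hp
          have h3' := hvm _ _ hv
          match p, h3, q, h3' with
          | [p0, p1, p2], _, [q0, q1, q2], _ => simp [pvMrg]
      · simp only [if_neg hk]
        exact hd k'

-- ===== VERDICT (by name: the statement is the Claim_ definition above) =====
theorem join_res_spec : Claim_equal_join_res := by
  unfold Claim_equal_join_res Spec_join_res
  intro price_res val_res _
  unfold join_res join_res_alt
  set pm : PySem.Dict String (List (Option Int)) :=
    price_res.foldl (fun d x => d.insert x.1 [x.2.1, x.2.2.1, x.2.2.2]) PySem.Dict.empty with hpm_def
  set vm : PySem.Dict String (List (Option Int)) :=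
    val_res.foldl (fun d x => d.insert x.1 [x.2.1, x.2.2.1, x.2.2.2]) PySem.Dict.empty with hvm_def
  set d0 : PySem.Dict String (List (Option Int)) :=
    price_res.foldl (fun d x =>
      d.insert x.1 [x.2.1, x.2.2.1, x.2.2.2, none, none, none]) PySem.Dict.empty with hd0_def
  set d1 : PySem.Dict String (List (Option Int)) :=
    val_res.foldl (fun d x =>
      d.insert x.1 (match d.get? x.1 with
        | none => [none, none, none, x.2.1, x.2.2.1, x.2.2.2]
        | some v => ((v.set 3 x.2.1).set 4 x.2.2.1).set 5 x.2.2.2)) d0 with hd1_def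
  have hpm3 : ∀ k p, pm.get? k = some p → p.length = 3 := by
    refine pv_len3 _ _ ?_
    intro k p h; rw [PySem.Dict.get?_empty] at h; cases h
  have hvm3 : ∀ k p, vm.get? k = some p → p.length = 3 := by
    refine pv_len3 _ _ ?_
    intro k p h; rw [PySem.Dict.get?_empty] at h; cases h
  have hd0m : ∀ k, d0.get? k = (pm.get? k).map (fun p => p ++ [none, none, none]) :=
    pv_price price_res PySem.Dict.empty PySem.Dict.empty
      (by intro k; rw [PySem.Dict.get?_empty]; rfl)
  have hd0 : ∀ k, d0.get? k = pvMrg (pm.get? k) ((PySem.Dict.empty : PySem.Dict String (List (Option Int))).get? k) := by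
    intro k
    rw [hd0m k, PySem.Dict.get?_empty]
    cases pm.get? k <;> simp [pvMrg]
  have hd1 : ∀ k, d1.get? k = pvMrg (pm.get? k) (vm.get? k) :=
    pv_inv pm hpm3 val_res d0 PySem.Dict.empty
      (by intro k p h; rw [PySem.Dict.get?_empty] at h; cases h) hd0
  -- keys agree
  have a1 : d1.keys = PySem.Set.update d0.keys (val_res.map (fun x => x.1)) :=
    PySem.Dict.keys_foldl_insert_key val_res (fun x => x.1)
      (fun d x => (match d.get? x.1 with
        | none => [none, none, none, x.2.1, x.2.2.1, x.2.2.2]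
        | some v => ((v.set 3 x.2.1).set 4 x.2.2.1).set 5 x.2.2.2)) d0
  have a2 : d0.keys = PySem.Set.update PySem.Dict.empty.keys (price_res.map (fun x => x.1)) :=
    PySem.Dict.keys_foldl_insert_key price_res (fun x => x.1)
      (fun _ x => [x.2.1, x.2.2.1, x.2.2.2, none, none, none]) PySem.Dict.empty
  have a3 : pm.keys = PySem.Set.update PySem.Dict.empty.keys (price_res.map (fun x => x.1)) :=
    PySem.Dict.keys_foldl_insert_key price_res (fun x => x.1)
      (fun _ x => [x.2.1, x.2.2.1, x.2.2.2]) PySem.Dict.empty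
  have a4 : vm.keys = PySem.Set.update PySem.Dict.empty.keys (val_res.map (fun x => x.1)) :=
    PySem.Dict.keys_foldl_insert_key val_res (fun x => x.1)
      (fun _ x => [x.2.1, x.2.2.1, x.2.2.2]) PySem.Dict.empty
  have e2 : vm.keys = PySem.Set.ofList (val_res.map (fun x => x.1)) := by
    rw [a4, PySem.Dict.keys_empty, PySem.Set.update_nil_left]
  have hkd1 : d1.keys = pm.keys ++ vm.keys.filter (fun k => !(pm.contains k)) := by
    rw [a1, a2, ← a3, PySem.Set.update_eq_append_filter, e2]
    congr 1
    apply List.filter_congr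
    intro k _
    rw [PySem.Dict.contains_eq_decide_mem_keys]
    simp [PySem.Set.contains_eq_listContains]
  have hnd : d1.keys.Nodup :=
    PySem.Dict.nodup_keys_foldl_insert_key val_res (fun x => x.1)
      (fun d x => (match d.get? x.1 with
        | none => [none, none, none, x.2.1, x.2.2.1, x.2.2.2]
        | some v => ((v.set 3 x.2.1).set 4 x.2.2.1).set 5 x.2.2.2)) d0
      (PySem.Dict.nodup_keys_foldl_insert_key price_res (fun x => x.1)
        (fun _ x => [x.2.1, x.2.2.1, x.2.2.2, none, none, none]) PySem.Dict.empty
        PySem.Dict.nodup_keys_empty)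
  -- assemble
  rw [PySem.Dict.items_eq_map_keys d1 hnd ([] : List (Option Int)), hkd1]
  apply List.map_congr_left
  intro k hk
  have hsome : pm.get? k ≠ none ∨ vm.get? k ≠ none := by
    rcases List.mem_append.mp hk with h | h
    · left
      rw [Ne, PySem.Dict.get?_eq_none_iff_not_mem_keys]
      simp [h]
    · right
      rw [Ne, PySem.Dict.get?_eq_none_iff_not_mem_keys]
      simp [(List.mem_filter.mp h).1]
  have hmain : d1.getD k [] = pm.getD k [none, none, none] ++ vm.getD k [none, none, none] := by
    rw [PySem.Dict.getD_eq_get?_getD, PySem.Dict.getD_eq_get?_getD, PySem.Dict.getD_eq_get?_getD, hd1 k]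
    rcases hp : pm.get? k with _ | p <;> rcases hv : vm.get? k with _ | q
    · rcases hsome with h | h
      · exact absurd hp h
      · exact absurd hv h
    · simp [pvMrg]
    · simp [pvMrg]
    · simp [pvMrg]
  rw [hmain]
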